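-- pv_equiv track=rewrite | github.com/drake-mer/advent-of-code-python | advent_of_code/year_2023/day13.py | find_symmetry_axis
-- ===== SOURCE A (Python) =====
-- def find_symmetry_axis(vector: list[int]) -> list[int]:
--     all_axis = []
--     for k in range(0, len(vector)):
--         s1, s2 = vector[:k], vector[k:]
--         if len(s1) % 2 == 0 and s1 and s1[::-1] == s1:
--             all_axis.append(len(s1) // 2)
--         if len(s2) % 2 == 0 and s2 and s2[::-1] == s2:
--             all_axis.append(k + len(s2) // 2)
--     return all_axis
-- ===== SOURCE B (Python) =====
-- def find_symmetry_axis(vector: list[int]) -> list[int]: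
--     # Center-expansion: precompute the palindromic radius at each gap once,
--     # then read off even palindromic prefixes/suffixes in one pass over k.
--     n = len(vector)
--     rad = []
--     for c in range(n + 1):
--         r = 0
--         while r < c and r < n - c and vector[c - 1 - r] == vector[c + r]:
--             r += 1
--         rad.append(r)
--     out = []
--     for k in range(n):
--         if k % 2 == 0 and k > 0 and rad[k // 2] == k // 2:
--             out.append(k // 2)
--         if (n - k) % 2 == 0 and rad[(k + n) // 2] == (n - k) // 2:
--             out.append((k + n) // 2)
--     return out
-- ===== Notes on version B (the rewrite author's own statement) =====
-- stated objective: alternative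
-- what changed: A slices, copies and reverses both the prefix and the suffix at every split point; B precomputes one palindromic-radius table by expanding around each gap (stopping at the first mismatch) and then reads off even palindromic prefixes and suffixes in a single pass over k.
import Mathlib
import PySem

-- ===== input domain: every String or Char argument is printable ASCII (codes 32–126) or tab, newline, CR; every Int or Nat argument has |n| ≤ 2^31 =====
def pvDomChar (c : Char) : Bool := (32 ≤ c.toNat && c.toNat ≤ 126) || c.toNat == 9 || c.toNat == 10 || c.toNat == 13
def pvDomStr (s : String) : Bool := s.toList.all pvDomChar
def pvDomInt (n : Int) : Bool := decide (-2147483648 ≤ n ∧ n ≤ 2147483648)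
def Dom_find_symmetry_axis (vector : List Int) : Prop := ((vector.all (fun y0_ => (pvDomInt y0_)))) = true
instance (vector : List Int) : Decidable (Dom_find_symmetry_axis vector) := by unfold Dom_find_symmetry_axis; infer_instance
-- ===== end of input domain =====

-- B replaces A's per-k slice-copy-and-reverse palindrome tests by one precomputed
-- center-expansion radius table, read off in a single pass over k.

-- ===== PORT A =====
-- k and all lengths are nonnegative here, so Nat take/drop, Nat division and
-- List.reverse are exact for vector[:k], vector[k:], len(..)//2 and s[::-1].
def find_symmetry_axis (vector : List Int) : List Int :=
  (List.range vector.length).foldl (fun all_axis k =>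
    let s1 := vector.take k
    let s2 := vector.drop k
    let all_axis :=
      if s1.length % 2 == 0 && !s1.isEmpty && s1.reverse == s1 then
        all_axis ++ [((s1.length / 2 : Nat) : Int)]
      else all_axis
    if s2.length % 2 == 0 && !s2.isEmpty && s2.reverse == s2 then
      all_axis ++ [((k : Int) + ((s2.length / 2 : Nat) : Int))]
    else all_axis) []

-- ===== PORT B =====
-- the 'while' loop of Source B: expand around gap c starting from r matching pairs;
-- both indices are in range whenever the guard holds, so getD is exact there.
def pvExpand (vector : List Int) (c : Nat) (r : Nat) : Nat :=
  if h : r < c ∧ r < vector.length - c ∧ vector.getD (c - 1 - r) 0 = vector.getD (c + r) 0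
  then pvExpand vector c (r + 1) else r
termination_by c - r
decreasing_by omega

def find_symmetry_axis_alt (vector : List Int) : List Int :=
  let n := vector.length
  let rad := (List.range (n + 1)).map (fun c => pvExpand vector c 0)
  (List.range n).foldl (fun out k =>
    let out :=
      if k % 2 == 0 && decide (0 < k) && rad.getD (k / 2) 0 == k / 2 then
        out ++ [((k / 2 : Nat) : Int)]
      else out
    if (n - k) % 2 == 0 && rad.getD ((k + n) / 2) 0 == (n - k) / 2 then
      out ++ [(((k + n) / 2 : Nat) : Int)]
    else out) []

-- ===== PRECONDITION & SPEC =====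
def Spec_find_symmetry_axis (vector : List Int) (out : List Int) : Prop := out = find_symmetry_axis_alt vector
instance (vector : List Int) (out : List Int) : Decidable (Spec_find_symmetry_axis vector out) := by unfold Spec_find_symmetry_axis; infer_instance

-- ===== CLAIM (what is proved, stated in full; the proofs are below) =====
def Claim_equal_find_symmetry_axis : Prop := ∀ (vector : List Int), Dom_find_symmetry_axis vector → Spec_find_symmetry_axis vector (find_symmetry_axis vector)

-- ===== LEMMAS AND PROOFS =====

theorem pv_getD_take (v : List Int) (k i : Nat) (hi : i < k) (hk : k ≤ v.length) :
    (v.take k).getD i 0 = v.getD i 0 := by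
  rw [List.getD_eq_getElem _ _ (by simp; omega), List.getD_eq_getElem _ _ (by omega)]
  simp

theorem pv_getD_drop (v : List Int) (k i : Nat) (hi : i < v.length - k) :
    (v.drop k).getD i 0 = v.getD (k + i) 0 := by
  rw [List.getD_eq_getElem _ _ (by simp; omega), List.getD_eq_getElem _ _ (by omega)]
  simp

-- palindromy of a list as a pointwise condition on indexed reads
theorem pv_reverse_eq_self_iff (s : List Int) :
    s.reverse = s ↔ ∀ i, i < s.length → s.getD i 0 = s.getD (s.length - 1 - i) 0 := by
  constructor
  · intro h i hi
    conv_lhs => rw [← h]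
    rw [List.getD_eq_getElem _ _ (by simpa using hi), List.getD_eq_getElem _ _ (by omega)]
    rw [List.getElem_reverse]
  · intro h
    apply List.ext_getElem (by simp)
    intro i h1 h2
    rw [List.getElem_reverse]
    have hx := h (s.length - 1 - i) (by omega)
    rw [List.getD_eq_getElem _ _ (by omega), List.getD_eq_getElem _ _ (by omega)] at hx
    simp only [show s.length - 1 - (s.length - 1 - i) = i from by omega] at hx
    exact hx

-- the while-loop reaches the full bound m = min c (n-c) exactly when every
-- remaining pair of mirror positions around gap c matches
theorem pvExpand_eq_min_iff (v : List Int) (c : Nat) :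
    ∀ (r : Nat), r ≤ min c (v.length - c) →
    (pvExpand v c r = min c (v.length - c) ↔
      ∀ i, r ≤ i → i < min c (v.length - c) →
        v.getD (c - 1 - i) 0 = v.getD (c + i) 0) := by
  have key : ∀ d r, r ≤ min c (v.length - c) → min c (v.length - c) - r = d →
      (pvExpand v c r = min c (v.length - c) ↔
        ∀ i, r ≤ i → i < min c (v.length - c) →
          v.getD (c - 1 - i) 0 = v.getD (c + i) 0) := by
    intro d
    induction d with
    | zero =>
      intro r hr h0
      have hrm : r = min c (v.length - c) := by omega
      rw [pvExpand.eq_def, dif_neg (by rintro ⟨h1, h2, -⟩; omega)]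
      constructor
      · intro _ i h1 h2; omega
      · intro _; exact hrm
    | succ d ih =>
      intro r hr h0
      have hrlt : r < min c (v.length - c) := by omega
      rw [pvExpand.eq_def]
      by_cases hp : v.getD (c - 1 - r) 0 = v.getD (c + r) 0
      · rw [dif_pos ⟨by omega, by omega, hp⟩]
        rw [ih (r + 1) (by omega) (by omega)]
        constructor
        · intro h i h1 h2
          rcases Nat.eq_or_lt_of_le h1 with he | hlt
          · cases he; exact hp
          · exact h i hlt h2
        · intro h i h1 h2; exact h i (by omega) h2
      · rw [dif_neg (by rintro ⟨-, -, hq⟩; exact hp hq)]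
        constructor
        · intro h; exact absurd h (by omega)
        · intro h; exact absurd (h r (le_refl r) hrlt) hp
  intro r hr
  exact key (min c (v.length - c) - r) r hr rfl

-- re-indexing: mirror pairs of the segment [a, b) around its center c
theorem pv_pairs_iff (v : List Int) (a b c : Nat) (hc : a + b = 2 * c) (hab : a ≤ b) :
    (∀ j, a ≤ j → j < b → v.getD j 0 = v.getD (a + b - 1 - j) 0) ↔
    (∀ i, i < c - a → v.getD (c - 1 - i) 0 = v.getD (c + i) 0) := by
  constructor
  · intro h i hi
    have h1 := h (c - 1 - i) (by omega) (by omega)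
    rw [show a + b - 1 - (c - 1 - i) = c + i from by omega] at h1
    exact h1
  · intro h j hj1 hj2
    by_cases hcj : j < c
    · have h1 := h (c - 1 - j) (by omega)
      rw [show c - 1 - (c - 1 - j) = j from by omega,
          show c + (c - 1 - j) = a + b - 1 - j from by omega] at h1
      exact h1
    · have h1 := h (j - c) (by omega)
      rw [show c - 1 - (j - c) = a + b - 1 - j from by omega,
          show c + (j - c) = j from by omega] at h1
      exact h1.symm

-- even prefix vector[:k] is a palindrome iff the expansion at gap k/2 is full
theorem pv_prefix_pal_iff (v : List Int) (k : Nat) (hk : k ≤ v.length) (he : k % 2 = 0) :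
    ((v.take k).reverse = v.take k) ↔ pvExpand v (k / 2) 0 = k / 2 := by
  have hlen : (v.take k).length = k := by simp; omega
  have hmin : min (k / 2) (v.length - k / 2) = k / 2 := by omega
  have h1 : ((v.take k).reverse = v.take k) ↔
      ∀ j, j < k → v.getD j 0 = v.getD (k - 1 - j) 0 := by
    rw [pv_reverse_eq_self_iff]
    simp only [hlen]
    constructor
    · intro h j hj
      have hx := h j hj
      rwa [pv_getD_take v k j hj hk, pv_getD_take v k _ (by omega) hk] at hx
    · intro h j hj
      rw [pv_getD_take v k j hj hk, pv_getD_take v k _ (by omega) hk]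
      exact h j hj
  have h2 := pv_pairs_iff v 0 k (k / 2) (by omega) (by omega)
  simp only [Nat.zero_le, Nat.zero_add, Nat.sub_zero, true_implies] at h2
  have h3 := pvExpand_eq_min_iff v (k / 2) 0 (by omega)
  rw [hmin] at h3
  simp only [Nat.zero_le, true_implies] at h3
  rw [h1, h2, h3]

-- even suffix vector[k:] is a palindrome iff the expansion at gap (k+n)/2 is full
theorem pv_suffix_pal_iff (v : List Int) (k : Nat) (hk : k < v.length)
    (he : (v.length - k) % 2 = 0) :
    ((v.drop k).reverse = v.drop k) ↔
      pvExpand v ((k + v.length) / 2) 0 = (v.length - k) / 2 := by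
  have hlen : (v.drop k).length = v.length - k := by simp
  have hc : k + v.length = 2 * ((k + v.length) / 2) := by omega
  have hmin : min ((k + v.length) / 2) (v.length - (k + v.length) / 2)
      = (v.length - k) / 2 := by omega
  have h1 : ((v.drop k).reverse = v.drop k) ↔
      ∀ j, k ≤ j → j < v.length → v.getD j 0 = v.getD (k + v.length - 1 - j) 0 := by
    rw [pv_reverse_eq_self_iff]
    simp only [hlen]
    constructor
    · intro h j hj1 hj2
      have hx := h (j - k) (by omega)
      rw [pv_getD_drop v k _ (by omega), pv_getD_drop v k _ (by omega),
          show k + (j - k) = j from by omega,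
          show k + (v.length - k - 1 - (j - k)) = k + v.length - 1 - j from by omega] at hx
      exact hx
    · intro h i hi
      rw [pv_getD_drop v k i hi, pv_getD_drop v k _ (by omega)]
      have hx := h (k + i) (by omega) (by omega)
      rw [show k + v.length - 1 - (k + i) = k + (v.length - k - 1 - i) from by omega] at hx
      exact hx
  have h2 := pv_pairs_iff v k v.length ((k + v.length) / 2) (by omega) (by omega)
  have h3 := pvExpand_eq_min_iff v ((k + v.length) / 2) 0 (by omega)
  rw [hmin] at h3
  simp only [Nat.zero_le, true_implies] at h3
  have hca : (k + v.length) / 2 - k = (v.length - k) / 2 := by omega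
  rw [hca] at h2
  rw [h1, h2, h3]

-- the rad table lookup is the expansion at that gap
theorem pv_rad_getD (v : List Int) (j : Nat) (hj : j < v.length + 1) :
    ((List.range (v.length + 1)).map (fun c => pvExpand v c 0)).getD j 0
      = pvExpand v j 0 := by
  rw [List.getD_eq_getElem _ _ (by simpa using hj)]
  simp

-- both loops only append: they are the concatenation of per-k contributions
theorem pv_foldl_two_ifs (l : List Nat) (c1 c2 : Nat → Bool) (f1 f2 : Nat → Int)
    (acc : List Int) :
    l.foldl (fun acc k =>
      let acc' := if c1 k then acc ++ [f1 k] else acc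
      if c2 k then acc' ++ [f2 k] else acc') acc
    = acc ++ l.flatMap (fun k =>
        (if c1 k then [f1 k] else []) ++ (if c2 k then [f2 k] else [])) := by
  induction l generalizing acc with
  | nil => simp
  | cons x xs ih =>
    simp only [List.foldl_cons, List.flatMap_cons, ih]
    cases h1 : c1 x <;> cases h2 : c2 x <;> simp

-- ===== VERDICT (by name: the statement is the Claim_ definition above) =====
theorem find_symmetry_axis_spec : Claim_equal_find_symmetry_axis := by
  unfold Claim_equal_find_symmetry_axis Spec_find_symmetry_axis
  intro v _
  have hA : find_symmetry_axis v = [] ++ (List.range v.length).flatMap (fun k =>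
      (if (v.take k).length % 2 == 0 && !(v.take k).isEmpty && ((v.take k).reverse == v.take k) then
        [(((v.take k).length / 2 : Nat) : Int)] else []) ++
      (if (v.drop k).length % 2 == 0 && !(v.drop k).isEmpty && ((v.drop k).reverse == v.drop k) then
        [((k : Int) + (((v.drop k).length / 2 : Nat) : Int))] else [])) :=
    pv_foldl_two_ifs (List.range v.length) _ _ _ _ []
  have hB : find_symmetry_axis_alt v = [] ++ (List.range v.length).flatMap (fun k =>
      (if k % 2 == 0 && decide (0 < k) &&
          (((List.range (v.length + 1)).map (fun c => pvExpand v c 0)).getD (k / 2) 0 == k / 2) then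
        [((k / 2 : Nat) : Int)] else []) ++
      (if (v.length - k) % 2 == 0 &&
          (((List.range (v.length + 1)).map (fun c => pvExpand v c 0)).getD ((k + v.length) / 2) 0
            == (v.length - k) / 2) then
        [(((k + v.length) / 2 : Nat) : Int)] else [])) :=
    pv_foldl_two_ifs (List.range v.length) _ _ _ _ []
  rw [hA, hB]
  simp only [List.nil_append]
  refine List.flatMap_congr ?_
  intro k hk
  rw [List.mem_range] at hk
  have hmink : min k v.length = k := by omega
  simp only [List.length_take, List.length_drop, hmink]
  rw [pv_rad_getD v (k / 2) (by omega), pv_rad_getD v ((k + v.length) / 2) (by omega)]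
  rw [show ((k : Int) + (((v.length - k) / 2 : Nat) : Int)) = (((k + v.length) / 2 : Nat) : Int) from by
    omega]
  have hb1 : (k % 2 == 0 && !(v.take k).isEmpty && ((v.take k).reverse == v.take k))
      = (k % 2 == 0 && decide (0 < k) && (pvExpand v (k / 2) 0 == k / 2)) := by
    rw [Bool.eq_iff_iff]
    simp only [Bool.and_eq_true, beq_iff_eq, Bool.not_eq_true', decide_eq_true_eq]
    constructor
    · rintro ⟨⟨h0, hne⟩, hpal⟩
      have hk0 : 0 < k := by
        by_contra hc
        have hk00 : k = 0 := by omega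
        subst hk00; simp at hne
      exact ⟨⟨h0, hk0⟩, (pv_prefix_pal_iff v k (by omega) h0).mp hpal⟩
    · rintro ⟨⟨h0, hk0⟩, hexp⟩
      refine ⟨⟨h0, ?_⟩, (pv_prefix_pal_iff v k (by omega) h0).mpr hexp⟩
      cases hvk : v.take k with
      | nil =>
        have hl : (v.take k).length = 0 := by rw [hvk]; rfl
        rw [List.length_take] at hl
        omega
      | cons a t => simp
  have hb2 : ((v.length - k) % 2 == 0 && !(v.drop k).isEmpty && ((v.drop k).reverse == v.drop k))
      = ((v.length - k) % 2 == 0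
          && (pvExpand v ((k + v.length) / 2) 0 == (v.length - k) / 2)) := by
    rw [Bool.eq_iff_iff]
    simp only [Bool.and_eq_true, beq_iff_eq, Bool.not_eq_true']
    constructor
    · rintro ⟨⟨h0, hne⟩, hpal⟩
      exact ⟨h0, (pv_suffix_pal_iff v k hk h0).mp hpal⟩
    · rintro ⟨h0, hexp⟩
      refine ⟨⟨h0, ?_⟩, (pv_suffix_pal_iff v k hk h0).mpr hexp⟩
      cases hvk : v.drop k with
      | nil =>
        have hl : (v.drop k).length = 0 := by rw [hvk]; rfl
        rw [List.length_drop] at hl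
        omega
      | cons a t => simp
  rw [hb1, hb2]
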